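-- pv_equiv track=rewrite | github.com/nboley/grit | grit/elements.py | find_jn_connected_exons
-- ===== SOURCE A (Python) =====
-- from collections import defaultdict, namedtuple
--
-- def find_jn_connected_exons(exons, jns, strand):
--     edges = set()
--
--     # build mappings from exon starts to indices
--     exon_starts_map = defaultdict(list)
--     exon_stops_map = defaultdict(list)
--     for start, stop in exons:
--         exon_starts_map[start].append( (start, stop) )
--         exon_stops_map[stop].append( (start, stop ) )
--
--     for jn in jns:
--         for start_exon in exon_stops_map[jn[0]-1]:
--             for stop_exon in exon_starts_map[jn[1]+1]:
--                 if strand == '+':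
--                     edges.add((tuple(jn), start_exon, stop_exon))
--                 else:
--                     edges.add((tuple(jn), stop_exon, start_exon))
--
--     return edges
-- ===== SOURCE B (Python) =====
-- def find_jn_connected_exons(exons, jns, strand):
--     # No index maps: for each junction, scan the exon list directly.
--     edges = set()
--     for jn in jns:
--         start_exons = [(s, e) for (s, e) in exons if e == jn[0] - 1]
--         stop_exons = [(s, e) for (s, e) in exons if s == jn[1] + 1]
--         for start_exon in start_exons:
--             for stop_exon in stop_exons:
--                 if strand == '+':
--                     edges.add((tuple(jn), start_exon, stop_exon))
--                 else:
--                     edges.add((tuple(jn), stop_exon, start_exon))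
--     return edges
-- ===== Notes on version B (the rewrite author's own statement) =====
-- stated objective: simpler
-- what changed: Drops both defaultdict indexes: for each junction B filters the exon list directly for exons ending at jn[0]-1 and starting at jn[1]+1 and nest-loops over those two lists, instead of pre-building start/stop hash maps.
import Mathlib
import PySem

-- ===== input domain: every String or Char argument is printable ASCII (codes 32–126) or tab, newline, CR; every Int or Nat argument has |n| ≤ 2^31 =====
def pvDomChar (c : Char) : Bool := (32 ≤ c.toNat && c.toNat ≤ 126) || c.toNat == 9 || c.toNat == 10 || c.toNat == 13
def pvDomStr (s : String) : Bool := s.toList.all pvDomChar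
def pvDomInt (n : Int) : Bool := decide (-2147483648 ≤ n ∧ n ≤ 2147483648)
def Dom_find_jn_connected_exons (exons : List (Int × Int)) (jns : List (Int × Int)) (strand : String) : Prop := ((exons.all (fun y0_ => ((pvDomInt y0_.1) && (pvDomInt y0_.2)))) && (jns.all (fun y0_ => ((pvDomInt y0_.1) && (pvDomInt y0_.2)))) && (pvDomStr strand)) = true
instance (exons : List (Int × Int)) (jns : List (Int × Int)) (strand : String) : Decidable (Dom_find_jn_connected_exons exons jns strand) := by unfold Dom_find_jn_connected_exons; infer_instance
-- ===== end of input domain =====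

-- B replaces A's two pre-built defaultdict indexes with a direct filter of the
-- exon list per junction (objective: simpler; same return value).

-- ===== PORT A =====
-- one pass over exons building both maps (Python: one for-loop updating two defaultdicts)
def pvBuildMaps_find_jn_connected_exons (exons : List (Int × Int)) :
    PySem.Dict Int (List (Int × Int)) × PySem.Dict Int (List (Int × Int)) :=
  exons.foldl
    (fun m p =>
      (m.1.modify p.1 [] (fun l => l ++ [p]), m.2.modify p.2 [] (fun l => l ++ [p])))
    (PySem.Dict.empty, PySem.Dict.empty)

def find_jn_connected_exons (exons : List (Int × Int)) (jns : List (Int × Int)) (strand : String) : List ((Int × Int) × (Int × Int) × (Int × Int)) :=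
  let maps := pvBuildMaps_find_jn_connected_exons exons
  let exon_starts_map := maps.1
  let exon_stops_map := maps.2
  jns.foldl
    (fun edges jn =>
      (exon_stops_map.getD (jn.1 - 1) []).foldl
        (fun edges start_exon =>
          (exon_starts_map.getD (jn.2 + 1) []).foldl
            (fun edges stop_exon =>
              if strand == "+" then PySem.Set.add edges (jn, start_exon, stop_exon)
              else PySem.Set.add edges (jn, stop_exon, start_exon))
            edges)
        edges)
    PySem.Set.empty

-- ===== PORT B =====
def find_jn_connected_exons_alt (exons : List (Int × Int)) (jns : List (Int × Int)) (strand : String) : List ((Int × Int) × (Int × Int) × (Int × Int)) :=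
  jns.foldl
    (fun edges jn =>
      let start_exons := exons.filter (fun p => p.2 == jn.1 - 1)
      let stop_exons := exons.filter (fun p => p.1 == jn.2 + 1)
      start_exons.foldl
        (fun edges start_exon =>
          stop_exons.foldl
            (fun edges stop_exon =>
              if strand == "+" then PySem.Set.add edges (jn, start_exon, stop_exon)
              else PySem.Set.add edges (jn, stop_exon, start_exon))
            edges)
        edges)
    PySem.Set.empty

-- ===== PRECONDITION & SPEC =====
def Spec_find_jn_connected_exons (exons : List (Int × Int)) (jns : List (Int × Int)) (strand : String) (out : List ((Int × Int) × (Int × Int) × (Int × Int))) : Prop := out = find_jn_connected_exons_alt exons jns strand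
instance (exons : List (Int × Int)) (jns : List (Int × Int)) (strand : String) (out : List ((Int × Int) × (Int × Int) × (Int × Int))) : Decidable (Spec_find_jn_connected_exons exons jns strand out) := by unfold Spec_find_jn_connected_exons; infer_instance

-- ===== CLAIM (what is proved, stated in full; the proofs are below) =====
def Claim_equal_find_jn_connected_exons : Prop := ∀ (exons : List (Int × Int)) (jns : List (Int × Int)) (strand : String), Dom_find_jn_connected_exons exons jns strand → Spec_find_jn_connected_exons exons jns strand (find_jn_connected_exons exons jns strand)

-- ===== LEMMAS AND PROOFS =====

-- the paired foldl building both maps is the pair of the two independent foldls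
theorem pvBuildMaps_eq (exons : List (Int × Int))
    (d1 d2 : PySem.Dict Int (List (Int × Int))) :
    exons.foldl
      (fun m p =>
        (m.1.modify p.1 [] (fun l => l ++ [p]), m.2.modify p.2 [] (fun l => l ++ [p])))
      (d1, d2)
    = (exons.foldl (fun d p => d.modify p.1 [] (fun l => l ++ [p])) d1,
       exons.foldl (fun d p => d.modify p.2 [] (fun l => l ++ [p])) d2) := by
  induction exons generalizing d1 d2 with
  | nil => rfl
  | cons p t ih => simpa [List.foldl] using ih _ _

-- a grouping loop keyed by `key` stores exactly the key-matching filter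
theorem getD_groupLoop (key : Int × Int → Int) (l : List (Int × Int))
    (d : PySem.Dict Int (List (Int × Int))) (k : Int) :
    (l.foldl (fun d p => d.modify (key p) [] (fun l => l ++ [p])) d).getD k []
    = d.getD k [] ++ l.filter (fun p => key p == k) := by
  induction l generalizing d with
  | nil => simp
  | cons p t ih =>
    simp only [List.foldl, List.filter, ih]
    rw [PySem.Dict.getD_modify]
    by_cases h : k = key p
    · subst h; simp
    · have hk : (key p == k) = false := by simpa using fun e => h e.symm
      simp [h, hk]

theorem find_jn_connected_exons_spec : Claim_equal_find_jn_connected_exons := by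
  intro exons jns strand _
  unfold Spec_find_jn_connected_exons find_jn_connected_exons find_jn_connected_exons_alt
    pvBuildMaps_find_jn_connected_exons
  rw [pvBuildMaps_eq]
  simp only [getD_groupLoop, PySem.Dict.getD_empty, List.nil_append]
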